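-- pv_equiv track=rewrite | github.com/Hetul803/AURA | aura/apps/backend/src/aura/learning.py | _tool_sequence
-- ===== SOURCE A (Python) =====
-- def _step_history(ctx: dict) -> list[dict]:
--     return list(ctx.get('step_history', []))
--
-- def _repair_history(ctx: dict) -> list[dict]:
--     return list(ctx.get('repair_history', []))
--
-- def _tool_sequence(ctx: dict) -> list[str]:
--     sequence: list[str] = []
--     for item in _step_history(ctx):
--         action = item.get('action')
--         if action and (not sequence or sequence[-1] != action):
--             sequence.append(action)
--     for item in _repair_history(ctx):
--         if item.get('strategy') and (not sequence or sequence[-1] != 'CODE_REPAIR'):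
--             sequence.append('CODE_REPAIR')
--     return sequence
-- ===== SOURCE B (Python) =====
-- def _tool_sequence(ctx: dict) -> list[str]:
--     # build flat label list, then collapse consecutive duplicates in one pass
--     labels = [item.get('action') for item in ctx.get('step_history', []) if item.get('action')]
--     labels += ['CODE_REPAIR' for item in ctx.get('repair_history', []) if item.get('strategy')]
--     return [x for x, prev in zip(labels, [None] + labels) if x != prev]
-- ===== Notes on version B (the rewrite author's own statement) =====
-- stated objective: simpler
-- what changed: Replaces the two interleaved dedup-while-appending loops with a build-then-collapse structure: first collect all truthy labels into one flat list, then remove consecutive duplicates in a single zip-with-shifted-self pass.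
import Mathlib
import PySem

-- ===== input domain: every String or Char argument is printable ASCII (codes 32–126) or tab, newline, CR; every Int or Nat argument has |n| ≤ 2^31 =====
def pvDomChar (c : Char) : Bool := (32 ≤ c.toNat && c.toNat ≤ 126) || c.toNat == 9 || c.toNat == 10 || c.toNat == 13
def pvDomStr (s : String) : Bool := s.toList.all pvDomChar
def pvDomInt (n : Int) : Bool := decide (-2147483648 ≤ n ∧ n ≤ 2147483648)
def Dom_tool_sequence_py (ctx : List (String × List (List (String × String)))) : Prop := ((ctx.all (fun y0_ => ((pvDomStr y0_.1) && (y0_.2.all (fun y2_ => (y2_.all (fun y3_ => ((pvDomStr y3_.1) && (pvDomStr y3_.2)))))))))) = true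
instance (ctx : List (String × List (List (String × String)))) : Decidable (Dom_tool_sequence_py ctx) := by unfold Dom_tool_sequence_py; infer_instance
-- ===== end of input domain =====

-- B replaces A's two interleaved dedup-while-appending loops by a build-then-collapse
-- structure (flat label list, then one consecutive-dedup pass); objective: simpler.

-- shared transliteration of Python dict lookup on an association list (first match)
def pvItemGet (d : List (String × String)) (k : String) : Option String :=
  (d.find? (fun p => p.1 == k)).map (·.2)

-- ctx.get(k, []) for the outer dict
def pvCtxGetD (ctx : List (String × List (List (String × String)))) (k : String) :
    List (List (String × String)) :=
  ((ctx.find? (fun p => p.1 == k)).map (·.2)).getD []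

-- ===== PORT A =====
def tool_sequence_py (ctx : List (String × List (List (String × String)))) : List String :=
  let seq1 := (pvCtxGetD ctx "step_history").foldl (fun seq item =>
    match pvItemGet item "action" with
    | some a =>
        if a ≠ "" ∧ (seq = [] ∨ PySem.List.pyGet? seq (-1) ≠ some a) then seq ++ [a] else seq
    | none => seq) []
  (pvCtxGetD ctx "repair_history").foldl (fun seq item =>
    if (pvItemGet item "strategy").getD "" ≠ "" ∧
        (seq = [] ∨ PySem.List.pyGet? seq (-1) ≠ some "CODE_REPAIR")
    then seq ++ ["CODE_REPAIR"] else seq) seq1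

-- ===== PORT B =====
def tool_sequence_py_alt (ctx : List (String × List (List (String × String)))) : List String :=
  let labels :=
    (pvCtxGetD ctx "step_history").filterMap (fun item =>
      match pvItemGet item "action" with
      | some a => if a ≠ "" then some a else none
      | none => none)
    ++ (pvCtxGetD ctx "repair_history").filterMap (fun item =>
      if (pvItemGet item "strategy").getD "" ≠ "" then some "CODE_REPAIR" else none)
  (labels.zip (none :: labels.map some)).filterMap
    (fun p => if some p.1 ≠ p.2 then some p.1 else none)

-- ===== PRECONDITION & SPEC =====
def Spec_tool_sequence_py (ctx : List (String × List (List (String × String)))) (out : List String) : Prop := out = tool_sequence_py_alt ctx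
instance (ctx : List (String × List (List (String × String)))) (out : List String) : Decidable (Spec_tool_sequence_py ctx out) := by unfold Spec_tool_sequence_py; infer_instance

-- ===== CLAIM (what is proved, stated in full; the proofs are below) =====
def Claim_equal_tool_sequence_py : Prop := ∀ (ctx : List (String × List (List (String × String)))), Dom_tool_sequence_py ctx → Spec_tool_sequence_py ctx (tool_sequence_py ctx)

-- ===== LEMMAS AND PROOFS =====

-- A's dedup-append step, abstracted over the label
def dedupStep (seq : List String) (a : String) : List String :=
  if seq = [] ∨ PySem.List.pyGet? seq (-1) ≠ some a then seq ++ [a] else seq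

-- B's collapse pass, generalized over the "previous label" seed
def zcollapse (prev : Option String) (l : List String) : List String :=
  (l.zip (prev :: l.map some)).filterMap (fun p => if some p.1 ≠ p.2 then some p.1 else none)

theorem zcollapse_nil (prev : Option String) : zcollapse prev [] = [] := rfl

theorem zcollapse_cons (prev : Option String) (a : String) (l : List String) :
    zcollapse prev (a :: l) =
      (if some a ≠ prev then [a] else []) ++ zcollapse (some a) l := by
  by_cases h : some a = prev
  · simp [zcollapse, h]
  · simp [zcollapse, h]

theorem cond_iff (seq : List String) (a : String) :
    (seq = [] ∨ PySem.List.pyGet? seq (-1) ≠ some a) ↔ PySem.List.pyGet? seq (-1) ≠ some a := by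
  constructor
  · rintro (h | h)
    · subst h; simp [PySem.List.pyGet?]
    · exact h
  · exact Or.inr

theorem foldl_dedupStep (l : List String) :
    ∀ seq : List String,
      l.foldl dedupStep seq = seq ++ zcollapse (PySem.List.pyGet? seq (-1)) l := by
  induction l with
  | nil => intro seq; simp [zcollapse_nil]
  | cons a l ih =>
    intro seq
    by_cases h : PySem.List.pyGet? seq (-1) = some a
    · have hcond : ¬ (seq = [] ∨ PySem.List.pyGet? seq (-1) ≠ some a) := by
        rw [cond_iff]; simpa using h
      simp only [List.foldl_cons, dedupStep, if_neg hcond]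
      rw [ih seq, h, zcollapse_cons]
      simp
    · have hcond : seq = [] ∨ PySem.List.pyGet? seq (-1) ≠ some a := Or.inr h
      simp only [List.foldl_cons, dedupStep, if_pos hcond]
      rw [ih (seq ++ [a]), PySem.List.pyGet?_neg_one_append_singleton, zcollapse_cons]
      have : some a ≠ PySem.List.pyGet? seq (-1) := fun he => h he.symm
      rw [if_pos this]
      simp

-- A's step-history loop is a dedupStep fold over the filtered action labels
theorem step_loop_eq (items : List (List (String × String))) :
    ∀ seq : List String,
      items.foldl (fun seq item =>
        match pvItemGet item "action" with
        | some a =>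
            if a ≠ "" ∧ (seq = [] ∨ PySem.List.pyGet? seq (-1) ≠ some a) then seq ++ [a] else seq
        | none => seq) seq
      = (items.filterMap (fun item =>
          match pvItemGet item "action" with
          | some a => if a ≠ "" then some a else none
          | none => none)).foldl dedupStep seq := by
  induction items with
  | nil => intro seq; rfl
  | cons item rest ih =>
    intro seq
    cases hg : pvItemGet item "action" with
    | none =>
      simp only [List.foldl_cons, List.filterMap_cons, hg]
      exact ih seq
    | some a =>
      simp only [List.foldl_cons, List.filterMap_cons, hg]
      by_cases ha : a = ""
      · subst ha; simp [ih]
      · have ha' : a ≠ "" := ha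
        rw [if_pos ha', List.foldl_cons, ← ih]
        have hstep : (if a ≠ "" ∧ (seq = [] ∨ PySem.List.pyGet? seq (-1) ≠ some a)
            then seq ++ [a] else seq) = dedupStep seq a := by
          simp [dedupStep, ha']
        rw [hstep]

-- A's repair-history loop is a dedupStep fold over the filtered CODE_REPAIR labels
theorem repair_loop_eq (items : List (List (String × String))) :
    ∀ seq : List String,
      items.foldl (fun seq item =>
        if (pvItemGet item "strategy").getD "" ≠ "" ∧
            (seq = [] ∨ PySem.List.pyGet? seq (-1) ≠ some "CODE_REPAIR")
        then seq ++ ["CODE_REPAIR"] else seq) seq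
      = (items.filterMap (fun item =>
          if (pvItemGet item "strategy").getD "" ≠ "" then some "CODE_REPAIR" else none)).foldl
          dedupStep seq := by
  induction items with
  | nil => intro seq; rfl
  | cons item rest ih =>
    intro seq
    simp only [List.foldl_cons, List.filterMap_cons]
    by_cases hs : (pvItemGet item "strategy").getD "" = ""
    · simp [hs, ih]
    · have hs' : (pvItemGet item "strategy").getD "" ≠ "" := hs
      rw [if_pos hs', List.foldl_cons, ← ih]
      have hstep : (if (pvItemGet item "strategy").getD "" ≠ "" ∧
          (seq = [] ∨ PySem.List.pyGet? seq (-1) ≠ some "CODE_REPAIR")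
          then seq ++ ["CODE_REPAIR"] else seq) = dedupStep seq "CODE_REPAIR" := by
        simp [dedupStep, hs']
      rw [hstep]

-- ===== VERDICT (by name: the statement is the Claim_ definition above) =====
theorem tool_sequence_py_spec : Claim_equal_tool_sequence_py := by
  intro ctx _
  unfold Spec_tool_sequence_py tool_sequence_py tool_sequence_py_alt
  rw [step_loop_eq, repair_loop_eq, ← List.foldl_append, foldl_dedupStep]
  have hnone : PySem.List.pyGet? ([] : List String) (-1) = none := by
    simp [PySem.List.pyGet?]
  rw [hnone]
  rfl
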